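-- pv_equiv track=rewrite | github.com/Parallax-x/Unit-tests | main.py | sort_durations
-- ===== SOURCE A (Python) =====
-- def sort_durations(course_list: list, mentors_list: list, durations_list: list) -> str:
--     courses_list = []
--     for course, mentor, dur in zip(course_list, mentors_list, durations_list):
--         course_dict = {'title': course, 'mentors': mentor, 'duration': dur}
--         courses_list.append(course_dict)
--     durations_dict = {}
--     for id_, course in enumerate(courses_list):
--         key = course['duration']
--         durations_dict.setdefault(key, [])
--         durations_dict[key].append(id_)
--     durations_dict = dict(sorted(durations_dict.items()))
--     result = []
--     for key, ids in durations_dict.items():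
--         for id_ in ids:
--             result.append(f"{courses_list[id_]['title']} - {key} месяцев")
--     return '\n'.join(result)
-- ===== SOURCE B (Python) =====
-- def sort_durations(course_list: list, mentors_list: list, durations_list: list) -> str:
--     pairs = sorted(zip(durations_list, course_list, mentors_list), key=lambda p: p[0])
--     return '\n'.join(f'{title} - {dur} месяцев' for dur, title, _ in pairs)
-- ===== Notes on version B (the rewrite author's own statement) =====
-- stated objective: simpler
-- what changed: Replaces A's course-dict list, duration-to-ids grouping dict, sorted-items rebuild and two-level output loop with a single stable sort of the zipped (duration, title, mentor) tuples by duration followed by one formatting pass.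
import Mathlib
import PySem

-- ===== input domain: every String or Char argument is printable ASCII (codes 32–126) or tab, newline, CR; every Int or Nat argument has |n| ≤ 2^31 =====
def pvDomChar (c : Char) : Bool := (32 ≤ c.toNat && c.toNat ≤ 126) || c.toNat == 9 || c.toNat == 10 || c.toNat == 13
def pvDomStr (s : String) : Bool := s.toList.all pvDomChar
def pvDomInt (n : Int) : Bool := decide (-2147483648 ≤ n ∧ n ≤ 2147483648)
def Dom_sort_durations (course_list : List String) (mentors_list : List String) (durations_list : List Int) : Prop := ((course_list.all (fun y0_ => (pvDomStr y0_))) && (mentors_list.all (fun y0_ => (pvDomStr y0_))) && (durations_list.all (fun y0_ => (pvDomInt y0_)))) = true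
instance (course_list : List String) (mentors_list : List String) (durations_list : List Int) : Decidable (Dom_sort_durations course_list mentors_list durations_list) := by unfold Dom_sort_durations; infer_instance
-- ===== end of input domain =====

-- B replaces A's grouping-dict construction by one stable sort of the zipped tuples plus a single
-- formatting pass (objective: simpler; same return value).

-- ===== PORT A =====
-- A's course_dict {'title': …, 'mentors': …, 'duration': …} has three fixed string keys: ported as the
-- triple (title, mentors, duration).  dict(sorted(durations_dict.items())): Python compares the
-- (key, ids) tuples lexicographically; the dict's keys are distinct, so every comparison is decided by
-- the first component — ported exactly as sorting the items by (·.1) (Lean's pair `<` is not Python's).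
def sort_durations (course_list : List String) (mentors_list : List String) (durations_list : List Int) : String :=
  let courses_list : List (String × String × Int) :=
    (course_list.zip (mentors_list.zip durations_list)).foldl (fun acc t => acc ++ [t]) []
  let durations_dict : PySem.Dict Int (List Int) :=
    (PySem.List.enumerate courses_list).foldl
      (fun d p => (d.setdefault p.2.2.2 []).modify p.2.2.2 [] (fun ids => ids ++ [p.1]))
      PySem.Dict.empty
  let durations_dict2 : PySem.Dict Int (List Int) :=
    PySem.Dict.ofList (PySem.List.sorted durations_dict.items (fun q => q.1) false)
  let result : List String :=
    durations_dict2.items.foldl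
      (fun res q => q.2.foldl
        (fun res id_ =>
          res ++ [(PySem.List.pyGetD courses_list id_ ("", "", 0)).1 ++ " - " ++ PySem.Int.toStr q.1 ++ " месяцев"])
        res)
      []
  PySem.Str.join "\n" result

-- ===== PORT B =====
def sort_durations_alt (course_list : List String) (mentors_list : List String) (durations_list : List Int) : String :=
  let pairs := PySem.List.sorted (durations_list.zip (course_list.zip mentors_list)) (fun p => p.1) false
  PySem.Str.join "\n" (pairs.map (fun p => p.2.1 ++ " - " ++ PySem.Int.toStr p.1 ++ " месяцев"))

-- ===== PRECONDITION & SPEC =====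
def Spec_sort_durations (course_list : List String) (mentors_list : List String) (durations_list : List Int) (out : String) : Prop := out = sort_durations_alt course_list mentors_list durations_list
instance (course_list : List String) (mentors_list : List String) (durations_list : List Int) (out : String) : Decidable (Spec_sort_durations course_list mentors_list durations_list out) := by unfold Spec_sort_durations; infer_instance

-- ===== CLAIM (what is proved, stated in full; the proofs are below) =====
def Claim_equal_sort_durations : Prop := ∀ (course_list : List String) (mentors_list : List String) (durations_list : List Int), Dom_sort_durations course_list mentors_list durations_list → Spec_sort_durations course_list mentors_list durations_list (sort_durations course_list mentors_list durations_list)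

-- ===== LEMMAS AND PROOFS =====


-- setdefault then modify with the same default collapses to modify
theorem pvSetdefaultModify {κ ν : Type} [BEq κ] [LawfulBEq κ] (d : PySem.Dict κ ν) (k : κ) (v0 : ν) (f : ν → ν) :
    (d.setdefault k v0).modify k v0 f = d.modify k v0 f := by
  by_cases h : d.contains k = true
  · rw [PySem.Dict.setdefault_of_contains d v0 h]
  · rw [PySem.Dict.setdefault_of_not_contains d v0 (by simpa using h)]
    unfold PySem.Dict.modify
    rw [PySem.Dict.getD_insert_self, PySem.Dict.insert_insert_self,
        PySem.Dict.getD_of_not_contains d v0 (by simpa using h)]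

-- stable insertion keeps the lexicographic (key, arrival-index) order
theorem pvInsertByPairwise {α : Type} (key idx : α → Int) (x : α) (ys : List α)
    (hys : ys.Pairwise (fun a b => key a < key b ∨ (key a = key b ∧ idx a < idx b)))
    (hx : ∀ y ∈ ys, idx y < idx x) :
    (PySem.List.insertBy (fun a b => decide (key a < key b)) x ys).Pairwise
      (fun a b => key a < key b ∨ (key a = key b ∧ idx a < idx b)) := by
  induction ys with
  | nil => simp [PySem.List.insertBy]
  | cons y ys ih =>
    rw [List.pairwise_cons] at hys
    obtain ⟨hy, hys'⟩ := hys
    by_cases hlt : key x < key y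
    · simp only [PySem.List.insertBy, hlt, decide_true, if_true]
      refine List.Pairwise.cons ?_ (List.Pairwise.cons hy hys')
      intro z hz
      rcases List.mem_cons.mp hz with rfl | hz
      · exact Or.inl hlt
      · rcases hy z hz with h | ⟨h, _⟩
        · exact Or.inl (lt_trans hlt h)
        · exact Or.inl (h ▸ hlt)
    · simp only [PySem.List.insertBy, hlt, decide_false]
      refine List.Pairwise.cons ?_ (ih hys' (fun y hy' => hx y (List.mem_cons_of_mem _ hy')))
      intro z hz
      rcases (PySem.List.mem_insertBy _ x z ys).mp hz with rfl | hz
      · rcases lt_or_eq_of_le (le_of_not_gt hlt) with h | h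
        · exact Or.inl h
        · exact Or.inr ⟨h, hx y (List.mem_cons_self)⟩
      · exact hy z hz

theorem pvFoldlInsertByPairwise {α : Type} (key idx : α → Int) (xs : List α) (acc : List α)
    (hacc : acc.Pairwise (fun a b => key a < key b ∨ (key a = key b ∧ idx a < idx b)))
    (hcross : ∀ y ∈ acc, ∀ x ∈ xs, idx y < idx x)
    (hxs : xs.Pairwise (fun a b => idx a < idx b)) :
    (xs.foldl (fun acc x => PySem.List.insertBy (fun a b => decide (key a < key b)) x acc) acc).Pairwise
      (fun a b => key a < key b ∨ (key a = key b ∧ idx a < idx b)) := by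
  induction xs generalizing acc with
  | nil => simpa using hacc
  | cons x xs ih =>
    rw [List.pairwise_cons] at hxs
    refine ih _ (pvInsertByPairwise key idx x acc hacc (fun y hy => hcross y hy x List.mem_cons_self)) ?_ hxs.2
    intro y hy z hz
    rcases (PySem.List.mem_insertBy _ x y acc).mp hy with rfl | hy
    · exact hxs.1 z hz
    · exact hcross y hy z (List.mem_cons_of_mem _ hz)

theorem pvInsertByMap {α β : Type} (f : α → β) (before : β → β → Bool) (x : α) (ys : List α) :
    PySem.List.insertBy before (f x) (ys.map f)
      = (PySem.List.insertBy (fun a b => before (f a) (f b)) x ys).map f := by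
  induction ys with
  | nil => simp [PySem.List.insertBy]
  | cons y ys ih =>
    by_cases h : before (f x) (f y) = true
    · simp [PySem.List.insertBy, h]
    · simp only [List.map_cons, PySem.List.insertBy, h, if_false, Bool.false_eq_true, List.map]
      rw [ih]

theorem pvSortedMap {α β κ : Type} [LinearOrder κ] (f : α → β) (key : β → κ) (xs : List α) :
    PySem.List.sorted (xs.map f) key false
      = (PySem.List.sorted xs (fun a => key (f a)) false).map f := by
  rw [PySem.List.sorted_eq_foldl_insertBy, PySem.List.sorted_eq_foldl_insertBy]
  suffices h : ∀ (acc : List α),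
      (xs.map f).foldl (fun a x => PySem.List.insertBy (fun a b => decide (key a < key b)) x a) (acc.map f)
      = (xs.foldl (fun a x => PySem.List.insertBy (fun a b => decide (key (f a) < key (f b))) x a) acc).map f by
    simpa using h []
  induction xs with
  | nil => intro acc; simp
  | cons x xs ih =>
    intro acc
    simp only [List.map_cons, List.foldl_cons]
    rw [pvInsertByMap f _ x acc, ih]

-- grouping all elements by their key, over a nodup cover of the keys, is a permutation
theorem pvFlatMapFilterPerm {α : Type} (key : α → Int) :
    ∀ (ks : List Int) (E : List α), ks.Nodup → (∀ p ∈ E, key p ∈ ks) →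
      (ks.flatMap (fun k => E.filter (fun p => key p == k))).Perm E := by
  intro ks
  induction ks with
  | nil =>
    intro E _ hcov
    cases E with
    | nil => simp
    | cons a E => exact absurd (hcov a List.mem_cons_self) (by simp)
  | cons k ks ih =>
    intro E hnd hcov
    rw [List.nodup_cons] at hnd
    have hstep : ks.flatMap (fun k' => E.filter (fun p => key p == k'))
        = ks.flatMap (fun k' => (E.filter (fun p => !(key p == k))).filter (fun p => key p == k')) := by
      rw [List.flatMap]
      rw [List.flatMap]
      congr 1
      refine List.map_congr_left ?_
      intro k' hk'
      rw [List.filter_filter]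
      refine List.filter_congr ?_
      intro a _
      by_cases h : key a = k
      · have : k' ≠ k := fun he => hnd.1 (he ▸ hk')
        simp [h, Ne.symm this]
      · simp [h]
    rw [List.flatMap_cons, hstep]
    refine List.Perm.trans (List.Perm.append_left _ (ih _ hnd.2 ?_)) (List.filter_append_perm _ E)
    intro p hp
    rw [List.mem_filter] at hp
    have := hcov p hp.1
    rcases List.mem_cons.mp this with h | h
    · simp [h] at hp
    · exact h

-- the stable sort of the enumerated list IS the key-grouped flattening A builds
theorem pvSortedEnumerateEq (z : List (String × String × Int)) :
    PySem.List.sorted (PySem.List.enumerate z 0) (fun p => p.2.2.2) false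
      = (PySem.List.sorted (PySem.Set.ofList (z.map (fun t => t.2.2))) (fun x => x) false).flatMap
          (fun k => (PySem.List.enumerate z 0).filter (fun p => p.2.2.2 == k)) := by
  have hcov : ∀ p ∈ PySem.List.enumerate z 0, p.2.2.2 ∈ z.map (fun t => t.2.2) := by
    intro p hp
    rcases (PySem.List.mem_enumerate_iff z 0 p).mp hp with ⟨k, hk, rfl⟩
    exact List.mem_map.mpr ⟨z[k], List.getElem_mem hk, rfl⟩
  have hnodup : (PySem.List.sorted (PySem.Set.ofList (z.map (fun t => t.2.2))) (fun x => x) false).Nodup :=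
    (PySem.List.sorted_perm _ _ _).nodup_iff.mpr (PySem.Set.nodup_ofList _)
  have hperm : ((PySem.List.sorted (PySem.Set.ofList (z.map (fun t => t.2.2))) (fun x => x) false).flatMap
      (fun k => (PySem.List.enumerate z 0).filter (fun p => p.2.2.2 == k))).Perm (PySem.List.enumerate z 0) := by
    refine pvFlatMapFilterPerm _ _ _ hnodup ?_
    intro p hp
    exact (PySem.List.mem_sorted _ _ _ _).mpr ((PySem.Set.mem_ofList _ _).mpr (hcov p hp))
  refine List.Perm.eq_of_pairwise
    (le := fun (p q : Int × (String × String × Int)) => p.2.2.2 < q.2.2.2 ∨ (p.2.2.2 = q.2.2.2 ∧ p.1 < q.1)) ?_ ?_ ?_ ?_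
  · intro a b _ _ h1 h2
    exfalso
    rcases h1 with h | ⟨h, h'⟩ <;> rcases h2 with g | ⟨g, g'⟩ <;> omega
  · rw [PySem.List.sorted_eq_foldl_insertBy]
    exact pvFoldlInsertByPairwise (fun (p : Int × (String × String × Int)) => p.2.2.2) (fun p => p.1) _ []
      (by simp) (by simp) (PySem.List.pairwise_lt_enumerate z 0)
  · refine List.pairwise_flatMap.mpr ⟨?_, ?_⟩
    · intro k _
      refine List.Pairwise.imp_of_mem ?_ ((PySem.List.pairwise_lt_enumerate z 0).filter _)
      intro a b ha hb hab
      have ha' := (List.mem_filter.mp ha).2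
      have hb' := (List.mem_filter.mp hb).2
      exact Or.inr ⟨by rw [beq_iff_eq] at ha' hb'; omega, hab⟩
    · refine (PySem.List.sorted_ofList_pairwise_lt _).imp ?_
      intro k k' hkk' x hx y hy
      have hx' := (List.mem_filter.mp hx).2
      have hy' := (List.mem_filter.mp hy).2
      rw [beq_iff_eq] at hx' hy'
      exact Or.inl (by omega)
  · exact (PySem.List.sorted_perm _ _ _).trans hperm.symm

-- common canonical form: the enumerated zip, grouped by duration in increasing key order
def pvC (z : List (String × String × Int)) : List (Int × (String × String × Int)) :=
  (PySem.List.sorted (PySem.Set.ofList (z.map (fun t => t.2.2))) (fun x => x) false).flatMap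
    (fun k => (PySem.List.enumerate z 0).filter (fun p => p.2.2.2 == k))

def pvFmt (p : Int × (String × String × Int)) : String :=
  p.2.1 ++ " - " ++ PySem.Int.toStr p.2.2.2 ++ " месяцев"

theorem pvZipSwap : ∀ (cs ms : List String) (ds : List Int),
    ds.zip (cs.zip ms) = (cs.zip (ms.zip ds)).map (fun t => (t.2.2, (t.1, t.2.1))) := by
  intro cs
  induction cs with
  | nil => intro ms ds; simp
  | cons c cs ih =>
    intro ms ds
    cases ms with
    | nil => simp
    | cons m ms =>
      cases ds with
      | nil => simp
      | cons d ds => simp [ih]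

theorem pvB_eq (cs ms : List String) (ds : List Int) :
    sort_durations_alt cs ms ds = PySem.Str.join "\n" ((pvC (cs.zip (ms.zip ds))).map pvFmt) := by
  unfold sort_durations_alt
  have h1 : PySem.List.sorted (cs.zip (ms.zip ds)) (fun t => t.2.2) false
      = (PySem.List.sorted (PySem.List.enumerate (cs.zip (ms.zip ds)) 0) (fun p => p.2.2.2) false).map
          (fun p => p.2) := by
    conv_lhs => rw [← PySem.List.map_snd_enumerate (cs.zip (ms.zip ds)) 0]
    exact pvSortedMap _ _ _
  rw [pvZipSwap, pvSortedMap, h1, pvSortedEnumerateEq]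
  unfold pvC pvFmt
  simp only [List.map_map]
  exact congrArg _ (List.map_congr_left (fun p _ => rfl))

theorem pvA_eq (cs ms : List String) (ds : List Int) :
    sort_durations cs ms ds = PySem.Str.join "\n" ((pvC (cs.zip (ms.zip ds))).map pvFmt) := by
  unfold sort_durations
  simp only [PySem.List.foldl_append_singleton_eq_self, List.nil_append]
  set z := cs.zip (ms.zip ds) with hz
  -- the grouping loop: drop the redundant setdefault, then view it as a fold over (key, id) pairs
  rw [PySem.List.foldl_congr_mem (PySem.List.enumerate z 0) _
        (fun d p => d.modify p.2.2.2 [] fun ids => ids ++ [p.1]) PySem.Dict.empty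
        (fun acc x _ => pvSetdefaultModify acc _ _ _)]
  rw [show (List.foldl (fun d p => d.modify p.2.2.2 [] fun ids => ids ++ [p.1]) PySem.Dict.empty
        (PySem.List.enumerate z 0))
      = (List.foldl (fun d q => d.modify q.1 [] fun ids => ids ++ [q.2]) PySem.Dict.empty
        ((PySem.List.enumerate z 0).map (fun p => (p.2.2.2, p.1)))) from by rw [List.foldl_map]]
  set l := (PySem.List.enumerate z 0).map (fun p => (p.2.2.2, p.1)) with hl
  set D := List.foldl (fun d q => d.modify q.1 [] fun ids => ids ++ [q.2]) PySem.Dict.empty l with hDdef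
  have hlmap : l.map (fun q => q.1) = z.map (fun t => t.2.2) := by
    rw [hl, List.map_map]
    conv_rhs => rw [← PySem.List.map_snd_enumerate z 0, List.map_map]
    exact List.map_congr_left (fun p _ => rfl)
  have hkeys : D.keys = PySem.Set.ofList (z.map (fun t => t.2.2)) := by
    have h := PySem.Dict.keys_foldl_modify_key l (fun q => q.1) ([] : List Int)
      (fun _ q ids => ids ++ [q.2]) PySem.Dict.empty
    rw [hDdef]
    rw [show (List.foldl (fun d q => d.modify q.1 [] fun ids => ids ++ [q.2]) PySem.Dict.empty l)
        = (List.foldl (fun d x => d.modify x.1 [] ((fun (_ : PySem.Dict Int (List Int)) (q : Int × Int) (ids : List Int) => ids ++ [q.2]) d x)) PySem.Dict.empty l) from rfl]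
    rw [h, PySem.Dict.keys_empty, hlmap]
    rfl
  have hnodup : D.keys.Nodup := by
    rw [hkeys]; exact PySem.Set.nodup_ofList _
  have hget : ∀ k : Int, D.getD k [] = (l.filter (fun q => q.1 == k)).map (fun q => q.2) := by
    intro k
    have h := PySem.Dict.getD_foldl_modify_append l PySem.Dict.empty k
    simpa [PySem.Dict.getD_empty] using h
  have hitems : D.items = (PySem.Set.ofList (z.map (fun t => t.2.2))).map
      (fun k => (k, (l.filter (fun q => q.1 == k)).map (fun q => q.2))) := by
    rw [PySem.Dict.items_eq_map_keys D hnodup [], hkeys]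
    exact List.map_congr_left (fun k _ => by rw [hget])
  have hsorted : PySem.List.sorted D.items (fun q => q.1) false
      = (PySem.List.sorted (PySem.Set.ofList (z.map (fun t => t.2.2))) (fun x => x) false).map
          (fun k => (k, (l.filter (fun q => q.1 == k)).map (fun q => q.2))) := by
    refine PySem.List.sorted_eq_of_perm_of_pairwise_lt _ _ _ ?_ ?_
    · rw [hitems]; exact (PySem.List.sorted_perm _ _ _).map _
    · exact List.pairwise_map.mpr (PySem.List.sorted_ofList_pairwise_lt _)
  rw [hsorted]
  set LL := (PySem.List.sorted (PySem.Set.ofList (z.map (fun t => t.2.2))) (fun x => x) false).map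
      (fun k => (k, (l.filter (fun q => q.1 == k)).map (fun q => q.2))) with hLL
  have hfresh : (PySem.Dict.ofList LL).items = LL := by
    unfold PySem.Dict.ofList PySem.Dict.update
    have h := PySem.Dict.items_foldl_insert_fresh LL (fun p => p.1) (fun p => p.2) PySem.Dict.empty
      (fun a _ => by simp [PySem.Dict.contains_empty]) ?hnd
    · simpa using h
    case hnd =>
      have : LL.map (fun p => p.1) = PySem.List.sorted (PySem.Set.ofList (z.map (fun t => t.2.2))) (fun x => x) false := by
        rw [hLL, List.map_map]
        exact (List.map_congr_left (fun k _ => rfl)).trans (List.map_id _)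
      rw [this]
      exact (PySem.List.sorted_perm _ _ _).nodup_iff.mpr (PySem.Set.nodup_ofList _)
  rw [hfresh]
  -- the output loop is a flatMap of per-group formatted lines
  rw [PySem.List.foldl_congr_mem LL _
        (fun res q => res ++ q.2.map (fun i => (PySem.List.pyGetD z i ("", "", 0)).1 ++ " - " ++ PySem.Int.toStr q.1 ++ " месяцев")) ([] : List String)
        (fun acc x _ => PySem.List.foldl_append_singleton_eq_map _ _ _)]
  rw [show (List.foldl (fun res q => res ++ q.2.map (fun i => (PySem.List.pyGetD z i ("", "", 0)).1 ++ " - " ++ PySem.Int.toStr q.1 ++ " месяцев")) ([] : List String) LL)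
      = LL.flatMap (fun q => q.2.map (fun i => (PySem.List.pyGetD z i ("", "", 0)).1 ++ " - " ++ PySem.Int.toStr q.1 ++ " месяцев")) from by
        simpa using PySem.List.foldl_append_eq_flatMap _ LL []]
  rw [hLL, List.flatMap_map]
  unfold pvC
  rw [List.map_flatMap]
  rw [List.flatMap_def, List.flatMap_def]
  refine congrArg (PySem.Str.join "\n") (congrArg List.flatten (List.map_congr_left ?_))
  intro k _
  rw [hl, List.filter_map]
  rw [show ((fun (q : Int × Int) => q.1 == k) ∘ (fun (p : Int × (String × String × Int)) => (p.2.2.2, p.1)))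
      = (fun (p : Int × (String × String × Int)) => p.2.2.2 == k) from rfl]
  simp only [List.map_map]
  refine List.map_congr_left ?_
  intro p hp
  have hp1 := (List.mem_filter.mp hp).1
  have hp2 := (List.mem_filter.mp hp).2
  simp only [Function.comp_apply, beq_iff_eq] at hp2 ⊢
  rcases (PySem.List.mem_enumerate_iff z 0 p).mp hp1 with ⟨j, hj, rfl⟩
  unfold pvFmt
  simp [PySem.List.pyGetD_natCast, List.getD_eq_getElem?_getD, List.getElem?_eq_getElem hj]
  exact congrArg _ hp2.symm

-- ===== VERDICT (by name: the statement is the Claim_ definition above) =====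
theorem sort_durations_spec : Claim_equal_sort_durations := by
  intro cs ms ds _
  unfold Spec_sort_durations
  rw [pvA_eq, pvB_eq]
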